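-- pv_equiv track=rewrite | github.com/alickzhu/iclr2026-papers | add_subcats.py | assign_subcat
-- ===== SOURCE A (Python) =====
-- def assign_subcat(text, subcats_def):
--     """Assign a paper to a subcat based on text matching. Returns subcat index."""
--     text_lower = text.lower()
--     for si, (name, keywords) in enumerate(subcats_def):
--         if not keywords:  # catch-all
--             return si
--         for kw in keywords:
--             if kw in text_lower:
--                 return si
--     return len(subcats_def) - 1  # fallback to last (catch-all)
-- ===== SOURCE B (Python) =====
-- def assign_subcat(text, subcats_def):
--     """Assign a paper to a subcat based on text matching. Returns subcat index."""
--     t = text.lower()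
--     ans = len(subcats_def) - 1
--     for i in range(len(subcats_def) - 1, -1, -1):
--         _, kws = subcats_def[i]
--         if not kws or any(kw in t for kw in kws):
--             ans = i
--     return ans
-- ===== Notes on version B (the rewrite author's own statement) =====
-- stated objective: alternative
-- what changed: B replaces A's forward early-return double loop by a single backward fold over the indices that keeps the best (lowest) qualifying index in an accumulator, with the catch-all/fallback folded into one predicate.
import Mathlib
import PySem

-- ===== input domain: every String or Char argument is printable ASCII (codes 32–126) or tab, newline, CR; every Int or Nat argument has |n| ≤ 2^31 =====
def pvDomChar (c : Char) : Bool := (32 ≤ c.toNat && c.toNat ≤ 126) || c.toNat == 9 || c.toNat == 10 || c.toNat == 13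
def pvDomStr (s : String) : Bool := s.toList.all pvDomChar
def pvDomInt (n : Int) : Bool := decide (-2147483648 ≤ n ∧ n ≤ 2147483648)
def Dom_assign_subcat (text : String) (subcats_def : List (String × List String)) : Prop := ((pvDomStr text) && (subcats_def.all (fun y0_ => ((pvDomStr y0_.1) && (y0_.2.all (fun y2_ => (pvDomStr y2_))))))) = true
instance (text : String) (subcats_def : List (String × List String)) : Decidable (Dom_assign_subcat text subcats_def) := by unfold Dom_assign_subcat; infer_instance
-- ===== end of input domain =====

-- B replaces A's forward early-return double loop by one backward fold over the indices
-- keeping the lowest qualifying index in an accumulator (objective: alternative; same cost).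

-- ===== PORT A =====
-- A's outer for-loop with early returns: si is the running enumerate index, fallback = len(subcats_def) - 1
def assignLoopA (tl : String) (fallback : Int) : Int → List (String × List String) → Int
  | _, [] => fallback
  | si, (_, kws) :: rest =>
    if kws.isEmpty then si                                         -- `if not keywords: return si`
    else if kws.any (fun kw => PySem.Str.isIn kw tl) then si       -- inner `for kw … if kw in text_lower: return si`
    else assignLoopA tl fallback (si + 1) rest

def assign_subcat (text : String) (subcats_def : List (String × List String)) : Int :=
  assignLoopA (PySem.Str.lower text) ((subcats_def.length : Int) - 1) 0 subcats_def

-- ===== PORT B =====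
def assign_subcat_alt (text : String) (subcats_def : List (String × List String)) : Int :=
  let t := PySem.Str.lower text
  (PySem.List.pyRange ((subcats_def.length : Int) - 1) (-1) (-1)).foldl
    (fun ans i =>
      let kws := (PySem.List.pyGetD subcats_def i ("", [])).2
      if kws.isEmpty || kws.any (fun kw => PySem.Str.isIn kw t) then i else ans)
    ((subcats_def.length : Int) - 1)

-- ===== PRECONDITION & SPEC =====
def Spec_assign_subcat (text : String) (subcats_def : List (String × List String)) (out : Int) : Prop := out = assign_subcat_alt text subcats_def
instance (text : String) (subcats_def : List (String × List String)) (out : Int) : Decidable (Spec_assign_subcat text subcats_def out) := by unfold Spec_assign_subcat; infer_instance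

-- ===== CLAIM (what is proved, stated in full; the proofs are below) =====
def Claim_equal_assign_subcat : Prop := ∀ (text : String) (subcats_def : List (String × List String)), Dom_assign_subcat text subcats_def → Spec_assign_subcat text subcats_def (assign_subcat text subcats_def)

-- ===== LEMMAS AND PROOFS =====

-- the predicate both programs test on a subcat entry
def pvHit (t : String) (p : String × List String) : Bool :=
  p.2.isEmpty || p.2.any (fun kw => PySem.Str.isIn kw t)

-- A's loop finds the first index whose entry satisfies pvHit
theorem assignLoopA_eq (t : String) (fb : Int) (l : List (String × List String)) :
    ∀ si : Int, assignLoopA t fb si l =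
      match l.findIdx? (pvHit t) with
      | some i => si + (i : Int)
      | none => fb := by
  induction l with
  | nil => intro si; simp [assignLoopA]
  | cons x rest ih =>
    intro si
    obtain ⟨nm, kws⟩ := x
    rw [assignLoopA, List.findIdx?_cons]
    by_cases h1 : kws.isEmpty = true
    · have hp : pvHit t (nm, kws) = true := by simp only [pvHit, h1, Bool.true_or]
      rw [if_pos h1, hp, if_pos rfl]
      simp
    · by_cases h2 : (kws.any fun kw => PySem.Str.isIn kw t) = true
      · have hp : pvHit t (nm, kws) = true := by simp only [pvHit, h2, Bool.or_true]
        rw [if_neg h1, if_pos h2, hp, if_pos rfl]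
        simp
      · have hp : pvHit t (nm, kws) = false := by
          simp only [pvHit]
          rw [Bool.eq_false_iff]
          intro hc
          rcases Bool.or_eq_true_iff.mp hc with h | h
          exacts [h1 h, h2 h]
        rw [if_neg h1, if_neg h2, hp, if_neg (by simp), ih (si + 1)]
        cases rest.findIdx? (pvHit t) with
        | none => rfl
        | some i => simp only [Option.map_some]; push_cast; ring

-- B's backward fold over indices n-1 … 0 computes the first hit in the first n entries, else the seed
theorem foldB_eq (t : String) (l : List (String × List String)) :
    ∀ n : Nat, n ≤ l.length → ∀ d : Int,
      (((List.range n).map (fun k : Nat => ((n : Nat) : Int) - 1 - (k : Int))).foldl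
        (fun ans i =>
          let kws := (PySem.List.pyGetD l i ("", [])).2
          if kws.isEmpty || kws.any (fun kw => PySem.Str.isIn kw t) then i else ans) d) =
      match (l.take n).findIdx? (pvHit t) with
      | some i => (i : Int)
      | none => d := by
  intro n
  induction n with
  | zero => intro _ d; simp
  | succ n ih =>
    intro hn d
    have hlt : n < l.length := by omega
    -- the descending index list for n+1 is ↑n consed onto the one for n
    have hdesc : (List.range (n + 1)).map (fun k : Nat => (((n + 1 : Nat)) : Int) - 1 - (k : Int)) =
        ((n : Nat) : Int) :: (List.range n).map (fun k : Nat => ((n : Nat) : Int) - 1 - (k : Int)) := by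
      rw [List.range_succ_eq_map, List.map_cons, List.map_map]
      refine congrArg₂ List.cons (by push_cast; ring) ?_
      refine List.map_congr_left fun k _ => ?_
      simp only [Function.comp_apply, Nat.succ_eq_add_one]
      push_cast; ring
    rw [hdesc, List.foldl_cons, ih (by omega)]
    have hget : PySem.List.pyGetD l ((n : Nat) : Int) ("", []) = l[n] := by
      rw [PySem.List.pyGetD_natCast, List.getD_eq_getElem?_getD, List.getElem?_eq_getElem hlt,
        Option.getD_some]
    have htake : l.take (n + 1) = l.take n ++ [l[n]] := by
      rw [List.take_add_one, List.getElem?_eq_getElem hlt]; rfl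
    have hlen : (l.take n).length = n := List.length_take_of_le (by omega)
    rw [htake, List.findIdx?_append]
    cases hfi : (l.take n).findIdx? (pvHit t) with
    | some i => simp
    | none =>
      simp only [Option.none_or, List.findIdx?_cons, List.findIdx?_nil, Option.map_none,
        Option.or_none, hlen, hget, pvHit]
      by_cases hx : (l[n].2.isEmpty || l[n].2.any fun kw => PySem.Str.isIn kw t) = true
      · rw [if_pos hx, if_pos hx]
        simp
      · rw [if_neg hx, if_neg hx]
        rfl

-- ===== VERDICT (by name: the statement is the Claim_ definition above) =====
theorem assign_subcat_spec : Claim_equal_assign_subcat := by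
  intro text l _
  unfold Spec_assign_subcat assign_subcat assign_subcat_alt
  dsimp only
  rw [assignLoopA_eq]
  have ha : ((l.length : Int) - 1) - (-1) = (l.length : Int) := by ring
  rw [PySem.List.pyRange_neg_one, ha]
  have htn : ((l.length : Int)).toNat = l.length := by omega
  rw [htn, foldB_eq (PySem.Str.lower text) l l.length (le_refl _), List.take_length]
  cases l.findIdx? (pvHit (PySem.Str.lower text)) with
  | none => rfl
  | some i => simp
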